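-- pv_equiv track=rewrite | github.com/Hash9896/badminton-analysis | consolidated_analysis.py | _categorize_shot_variation
-- ===== SOURCE A (Python) =====
-- from typing import Dict, List, Tuple, Optional
--
-- _HITTING_ZONES = {
--     "front_left": {
--         "backhand": ["dribble", "lift", "netkeep", "nettap", "push", "netkill"],
--     },
--     "front_right": {
--         "forehand": ["dribble", "lift", "netkeep", "nettap", "push", "netkill"],
--     },
--     "back_right": {
--         "forehand": ["smash", "halfsmash", "clear", "drop", "pulldrop", "drive"],
--     },
--     "back_left": {
--         "backhand": ["smash", "halfsmash", "clear", "drop", "pulldrop", "drive"],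
--         "overhead": ["smash", "halfsmash", "clear", "drop"],
--     },
--     "middle_right": {
--         "forehand": ["defense"],
--     },
--     "middle_left": {
--         "backhand": ["defense"],
--     },
--     "middle_center": {
--         "other": ["flat_game"],
--     },
-- }
--
-- _LANDING_POSITIONS = {
--     "dribble": "front court",
--     "netkeep": "front court",
--     "nettap": "mid court",
--     "push": "back court",
--     "lift": "back court",
--     "defense": "front court",
--     "drive": "back court",
--     "smash": "mid court",
--     "clear": "back court",
--     "drop": "front court",
--     "pulldrop": "front court",
--     "halfsmash": "mid court",
--     "netkill": "mid court",
--     "flat_game": "mid court",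
-- }
--
-- def _categorize_shot_variation(stroke: str) -> Tuple[str, str, str]:
--     s = str(stroke)
--     direction = "cross" if s.endswith("_cross") else "straight"
--     base = s.replace("_cross", "")
--     parts = base.split("_")
--     shot_keyword = parts[-1] if len(parts) > 1 else base
--     landing = _LANDING_POSITIONS.get(shot_keyword, "other")
--
--     hitting_zone = "other"
--     for zone, hands in _HITTING_ZONES.items():
--         found = False
--         for hand, shots in hands.items():
--             for shot in shots:
--                 expected = f"{hand}_{shot}" if hand != "other" else shot
--                 if base == expected:
--                     hitting_zone = zone
--                     found = True
--                     break
--             if found: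
--                 break
--         if found:
--             break
--     return hitting_zone, direction, landing
-- ===== SOURCE B (Python) =====
-- from typing import Dict, List, Tuple, Optional
--
-- _LANDING_POSITIONS = {
--     "dribble": "front court",
--     "netkeep": "front court",
--     "nettap": "mid court",
--     "push": "back court",
--     "lift": "back court",
--     "defense": "front court",
--     "drive": "back court",
--     "smash": "mid court",
--     "clear": "back court",
--     "drop": "front court",
--     "pulldrop": "front court",
--     "halfsmash": "mid court",
--     "netkill": "mid court",
--     "flat_game": "mid court",
-- }
--
-- # Rule-based zone classifier: instead of scanning a nested zone->hand->shots table,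
-- # decompose the base name into hand prefix and shot suffix and derive the zone
-- # from two independent rules: the hand decides the court SIDE (backhand=left,
-- # forehand=right, overhead=back_left), the shot decides the DEPTH (net shots=front,
-- # rear-court shots=back, defense=middle). "flat_game" is the one hand-less name.
-- _FRONT_SHOTS = {"dribble", "lift", "netkeep", "nettap", "push", "netkill"}
-- _BACK_SHOTS = {"smash", "halfsmash", "clear", "drop", "pulldrop", "drive"}
-- _OVERHEAD_SHOTS = {"smash", "halfsmash", "clear", "drop"}
--
-- def _zone_by_rule(base):
--     if base == "flat_game":
--         return "middle_center"
--     hand, sep, shot = base.partition("_")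
--     if not sep:
--         return "other"
--     if hand == "overhead":
--         return "back_left" if shot in _OVERHEAD_SHOTS else "other"
--     if hand == "backhand":
--         side = "left"
--     elif hand == "forehand":
--         side = "right"
--     else:
--         return "other"
--     if shot in _FRONT_SHOTS:
--         return "front_" + side
--     if shot in _BACK_SHOTS:
--         return "back_" + side
--     if shot == "defense":
--         return "middle_" + side
--     return "other"
--
-- def _categorize_shot_variation(stroke: str) -> Tuple[str, str, str]:
--     s = str(stroke)
--     direction = "cross" if s.endswith("_cross") else "straight"
--     base = s.replace("_cross", "")
--     parts = base.split("_")
--     shot_keyword = parts[-1] if len(parts) > 1 else base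
--     landing = _LANDING_POSITIONS.get(shot_keyword, "other")
--     return _zone_by_rule(base), direction, landing
-- ===== Notes on version B (the rewrite author's own statement) =====
-- stated objective: alternative
-- what changed: A's triple-nested scan of the zone->hand->shots table (with break flags) is replaced by a rule-based classifier that never consults that table: B partitions the base name at its first underscore into hand and shot and derives the zone from two independent rules (hand decides the court side, shot category decides the court depth, with overhead and flat_game as special rules).
import Mathlib
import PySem

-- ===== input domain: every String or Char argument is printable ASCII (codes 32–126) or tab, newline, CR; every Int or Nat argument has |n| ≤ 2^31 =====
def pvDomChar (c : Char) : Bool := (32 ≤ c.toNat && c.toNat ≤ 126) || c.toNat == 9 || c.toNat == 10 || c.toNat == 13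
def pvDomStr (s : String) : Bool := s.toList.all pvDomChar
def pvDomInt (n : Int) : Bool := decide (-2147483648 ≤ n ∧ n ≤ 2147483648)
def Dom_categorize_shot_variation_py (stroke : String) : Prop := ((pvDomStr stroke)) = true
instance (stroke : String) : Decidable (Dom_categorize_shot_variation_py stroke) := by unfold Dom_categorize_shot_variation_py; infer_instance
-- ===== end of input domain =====

-- B replaces A's data-driven scan of the nested zone table by a rule-based classifier:
-- it splits the base name at its first underscore into hand and shot and derives the zone
-- from two rules (hand -> court side, shot -> court depth); objective: alternative.

-- module-level data shared by both Pythons (B only uses the landing table)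
def pyZones : List (String × List (String × List String)) :=
  [ ("front_left",   [("backhand", ["dribble", "lift", "netkeep", "nettap", "push", "netkill"])]),
    ("front_right",  [("forehand", ["dribble", "lift", "netkeep", "nettap", "push", "netkill"])]),
    ("back_right",   [("forehand", ["smash", "halfsmash", "clear", "drop", "pulldrop", "drive"])]),
    ("back_left",    [("backhand", ["smash", "halfsmash", "clear", "drop", "pulldrop", "drive"]),
                      ("overhead", ["smash", "halfsmash", "clear", "drop"])]),
    ("middle_right", [("forehand", ["defense"])]),
    ("middle_left",  [("backhand", ["defense"])]),
    ("middle_center",[("other",    ["flat_game"])]) ]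

def pyLanding : PySem.Dict String String :=
  PySem.Dict.ofList
    [ ("dribble", "front court"), ("netkeep", "front court"), ("nettap", "mid court"),
      ("push", "back court"), ("lift", "back court"), ("defense", "front court"),
      ("drive", "back court"), ("smash", "mid court"), ("clear", "back court"),
      ("drop", "front court"), ("pulldrop", "front court"), ("halfsmash", "mid court"),
      ("netkill", "mid court"), ("flat_game", "mid court") ]

-- ===== PORT A =====
-- the innermost 'for shot in shots' loop with its break
def aShotLoop (base hand : String) : List String → Bool
  | [] => false
  | shot :: rest =>
      let expected := if hand ≠ "other" then PySem.Str.join "_" [hand, shot] else shot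
      if base == expected then true else aShotLoop base hand rest

-- the 'for hand, shots in hands.items()' loop with its found/break flag
def aHandLoop (base : String) : List (String × List String) → Bool
  | [] => false
  | (hand, shots) :: rest => if aShotLoop base hand shots then true else aHandLoop base rest

-- the outer 'for zone, hands in _HITTING_ZONES.items()' loop
def aZoneLoop (base : String) : List (String × List (String × List String)) → String
  | [] => "other"
  | (zone, hands) :: rest => if aHandLoop base hands then zone else aZoneLoop base rest

def categorize_shot_variation_py (stroke : String) : String × String × String :=
  let s := stroke
  let direction := if PySem.Str.endswith s "_cross" then "cross" else "straight"
  let base := PySem.Str.replace s "_cross" ""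
  -- base.split("_"): the separator is the non-empty literal "_", so split? is always some
  let parts := (PySem.Str.split? base "_").getD []
  let shot_keyword := if 1 < parts.length then PySem.List.pyGetD parts (-1) "" else base
  let landing := PySem.Dict.getD pyLanding shot_keyword "other"
  (aZoneLoop base pyZones, direction, landing)

-- ===== PORT B =====
-- B's shot categories (Python sets of shot names, kept as lists of code-point lists)
def frontShots : List (List Char) :=
  ["dribble".toList, "lift".toList, "netkeep".toList, "nettap".toList, "push".toList, "netkill".toList]
def backShots : List (List Char) :=
  ["smash".toList, "halfsmash".toList, "clear".toList, "drop".toList, "pulldrop".toList, "drive".toList]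
def overheadShots : List (List Char) :=
  ["smash".toList, "halfsmash".toList, "clear".toList, "drop".toList]

-- hand-ported base.partition("_") for the one-character separator "_": exact — Python
-- returns (before, "_", after) at the FIRST occurrence, or (base, "", "") when absent
-- (none here encodes the empty separator, i.e. '_' does not occur).
def partitionUS : List Char → Option (List Char × List Char)
  | [] => none
  | c :: rest =>
      if c = '_' then some ([], rest)
      else match partitionUS rest with
        | none => none
        | some (h, t) => some (c :: h, t)

-- _zone_by_rule: hand prefix decides the court side, shot suffix decides the depth
def ruleZone (base : String) : String :=
  if base == "flat_game" then "middle_center"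
  else match partitionUS base.toList with
    | none => "other"
    | some (hand, shot) =>
      if hand = "overhead".toList then
        if shot ∈ overheadShots then "back_left" else "other"
      else if hand = "backhand".toList ∨ hand = "forehand".toList then
        let side := if hand = "backhand".toList then "left" else "right"
        if shot ∈ frontShots then PySem.Str.join "" ["front_", side]
        else if shot ∈ backShots then PySem.Str.join "" ["back_", side]
        else if shot = "defense".toList then PySem.Str.join "" ["middle_", side]
        else "other"
      else "other"

def categorize_shot_variation_py_alt (stroke : String) : String × String × String :=
  let s := stroke
  let direction := if PySem.Str.endswith s "_cross" then "cross" else "straight"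
  let base := PySem.Str.replace s "_cross" ""
  let parts := (PySem.Str.split? base "_").getD []
  let shot_keyword := if 1 < parts.length then PySem.List.pyGetD parts (-1) "" else base
  let landing := PySem.Dict.getD pyLanding shot_keyword "other"
  (ruleZone base, direction, landing)

-- ===== PRECONDITION & SPEC =====
def Spec_categorize_shot_variation_py (stroke : String) (out : String × String × String) : Prop := out = categorize_shot_variation_py_alt stroke
instance (stroke : String) (out : String × String × String) : Decidable (Spec_categorize_shot_variation_py stroke out) := by unfold Spec_categorize_shot_variation_py; infer_instance

-- ===== CLAIM (what is proved, stated in full; the proofs are below) =====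
def Claim_equal_categorize_shot_variation_py : Prop := ∀ (stroke : String), Dom_categorize_shot_variation_py stroke → Spec_categorize_shot_variation_py stroke (categorize_shot_variation_py stroke)

-- ===== LEMMAS AND PROOFS =====

-- the 31 base names A's scan can match (in search order)
def keys : List String :=
  [ "backhand_dribble", "backhand_lift", "backhand_netkeep", "backhand_nettap", "backhand_push",
    "backhand_netkill", "forehand_dribble", "forehand_lift", "forehand_netkeep", "forehand_nettap",
    "forehand_push", "forehand_netkill", "forehand_smash", "forehand_halfsmash", "forehand_clear",
    "forehand_drop", "forehand_pulldrop", "forehand_drive", "backhand_smash", "backhand_halfsmash",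
    "backhand_clear", "backhand_drop", "backhand_pulldrop", "backhand_drive", "overhead_smash",
    "overhead_halfsmash", "overhead_clear", "overhead_drop", "forehand_defense", "backhand_defense",
    "flat_game" ]

-- the key a (hand, shot) pair contributes
def expectedOf (hand shot : String) : String :=
  if hand ≠ "other" then PySem.Str.join "_" [hand, shot] else shot

-- the nested zone data flattened to (key, zone) pairs, in search order
def flatZones (zones : List (String × List (String × List String))) : List (String × String) :=
  zones.flatMap (fun zh => zh.2.flatMap (fun hs => hs.2.map (fun shot => (expectedOf hs.1 shot, zh.1))))

lemma beq_comm' {α : Type} [BEq α] [LawfulBEq α] (a b : α) : (a == b) = (b == a) := by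
  by_cases h : a = b
  · subst h; rfl
  · simp [h, Ne.symm h]

lemma aShotLoop_eq_any (base hand : String) (shots : List String) :
    aShotLoop base hand shots = shots.any (fun shot => expectedOf hand shot == base) := by
  induction shots with
  | nil => rfl
  | cons s rest ih =>
      show (if base == expectedOf hand s then true else aShotLoop base hand rest) = _
      rw [beq_comm' base, ih]
      cases h : (expectedOf hand s == base) <;> simp [List.any_cons, h, -ne_eq]

lemma aHandLoop_eq_any (base : String) (hands : List (String × List String)) :
    aHandLoop base hands = hands.any (fun hs => hs.2.any (fun shot => expectedOf hs.1 shot == base)) := by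
  induction hands with
  | nil => rfl
  | cons h rest ih =>
      obtain ⟨hand, shots⟩ := h
      show (if aShotLoop base hand shots then true else aHandLoop base rest) = _
      rw [aShotLoop_eq_any, ih]
      cases hs : (shots.any fun shot => expectedOf hand shot == base) <;>
        simp [List.any_cons, hs, -ne_eq]

-- the pairs one zone contributes to the flat list
lemma inner_find (z base : String) (hands : List (String × List String)) :
    (((hands.flatMap (fun hs => hs.2.map (fun shot => (expectedOf hs.1 shot, z)))).find?
        (fun p => p.1 == base)).map Prod.snd)
      = (if hands.any (fun hs => hs.2.any (fun shot => expectedOf hs.1 shot == base)) then some z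
         else none) := by
  cases hf : (hands.flatMap (fun hs => hs.2.map (fun shot => (expectedOf hs.1 shot, z)))).find?
      (fun p => p.1 == base) with
  | none =>
      have hall := List.find?_eq_none.mp hf
      have hany : (hands.any fun hs => hs.2.any fun shot => expectedOf hs.1 shot == base) = false := by
        rw [List.any_eq_false]
        intro hs hmem
        rw [Bool.not_eq_true, List.any_eq_false]
        intro shot hsm hb
        exact hall (expectedOf hs.1 shot, z)
          (by
            simp only [List.mem_flatMap, List.mem_map]
            exact ⟨hs, hmem, shot, hsm, rfl⟩) hb
      simp [hany]
  | some q =>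
      have hp := List.find?_some hf
      have hm := List.mem_of_find?_eq_some hf
      simp only [List.mem_flatMap, List.mem_map] at hm
      obtain ⟨hs, hsmem, shot, hshot, rfl⟩ := hm
      have hany : (hands.any fun hs => hs.2.any fun shot => expectedOf hs.1 shot == base) = true := by
        rw [List.any_eq_true]
        refine ⟨hs, hsmem, ?_⟩
        rw [List.any_eq_true]
        exact ⟨shot, hshot, hp⟩
      simp [hany]

lemma aZoneLoop_eq_flat (base : String) (zones : List (String × List (String × List String))) :
    aZoneLoop base zones
      = ((((flatZones zones).find? (fun p => p.1 == base)).map Prod.snd).getD "other") := by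
  induction zones with
  | nil => rfl
  | cons zh rest ih =>
      obtain ⟨z, hands⟩ := zh
      show (if aHandLoop base hands then z else aZoneLoop base rest) = _
      have hflat : flatZones ((z, hands) :: rest)
          = (hands.flatMap (fun hs => hs.2.map (fun shot => (expectedOf hs.1 shot, z))))
            ++ flatZones rest := by
        simp [flatZones]
      rw [hflat, List.find?_append, aHandLoop_eq_any, ih]
      cases hc : (hands.any fun hs => hs.2.any fun shot => expectedOf hs.1 shot == base) with
      | false =>
          have h0 : (((hands.flatMap (fun hs => hs.2.map (fun shot => (expectedOf hs.1 shot, z)))).find?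
              (fun p => p.1 == base)).map Prod.snd) = none := by
            rw [inner_find, hc]; simp
          have hn : ((hands.flatMap (fun hs => hs.2.map (fun shot => (expectedOf hs.1 shot, z)))).find?
              (fun p => p.1 == base)) = none := Option.map_eq_none_iff.mp h0
          simp [hn]
      | true =>
          have h0 : (((hands.flatMap (fun hs => hs.2.map (fun shot => (expectedOf hs.1 shot, z)))).find?
              (fun p => p.1 == base)).map Prod.snd) = some z := by
            rw [inner_find, hc]; simp
          obtain ⟨q, hq, hq2⟩ := Option.map_eq_some_iff.mp h0
          simp [hq, hq2]

-- if base is none of the 31 keys, A's scan returns "other"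
lemma aZoneLoop_other (base : String) (hb : base ∉ keys) : aZoneLoop base pyZones = "other" := by
  rw [aZoneLoop_eq_flat]
  have hks : ∀ p ∈ flatZones pyZones, p.1 ∈ keys := by decide
  have hfn : (flatZones pyZones).find? (fun p => p.1 == base) = none := by
    rw [List.find?_eq_none]
    intro p hp hbeq
    exact hb (eq_of_beq hbeq ▸ hks p hp)
  rw [hfn]
  rfl

lemma partitionUS_decomp : ∀ (l h t : List Char), partitionUS l = some (h, t) → l = h ++ '_' :: t := by
  intro l
  induction l with
  | nil => intro h t hp; simp [partitionUS] at hp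
  | cons c rest ih =>
      intro h t hp
      by_cases hc : c = '_'
      · subst hc
        simp [partitionUS] at hp
        obtain ⟨h1, h2⟩ := hp
        simp [← h1, ← h2]
      · rw [partitionUS, if_neg hc] at hp
        cases hrec : partitionUS rest with
        | none => rw [hrec] at hp; exact absurd hp (by simp)
        | some p =>
            rw [hrec] at hp
            obtain ⟨ph, pt⟩ := p
            simp at hp
            obtain ⟨h1, h2⟩ := hp
            have := ih ph pt hrec
            simp [← h1, ← h2, this]

-- if base is none of the 31 keys, B's rule classifier returns "other"
lemma ruleZone_other (base : String) (hb : base ∉ keys) : ruleZone base = "other" := by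
  have hfg : ¬ (base == "flat_game") = true := by
    intro h; exact hb (by rw [show base = "flat_game" from by simpa using h]; decide)
  unfold ruleZone
  rw [if_neg hfg]
  cases hp : partitionUS base.toList with
  | none => rfl
  | some p =>
      obtain ⟨hand, shot⟩ := p
      have hdec := partitionUS_decomp base.toList hand shot hp
      have hkey : ∀ (k : String), k ∈ keys → base.toList = k.toList → False := by
        intro k hk he
        exact hb (by rw [String.toList_inj.mp he]; exact hk)
      dsimp only
      by_cases hoh : hand = "overhead".toList
      · subst hoh
        rw [if_pos rfl]
        by_cases hsm : shot ∈ overheadShots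
        · exfalso
          simp [overheadShots] at hsm
          rcases hsm with h | h | h | h <;> subst h <;>
            [ exact hkey "overhead_smash" (by decide) (by rw [hdec]; decide);
              exact hkey "overhead_halfsmash" (by decide) (by rw [hdec]; decide);
              exact hkey "overhead_clear" (by decide) (by rw [hdec]; decide);
              exact hkey "overhead_drop" (by decide) (by rw [hdec]; decide) ]
        · rw [if_neg hsm]
      · rw [if_neg hoh]
        by_cases hbf : hand = "backhand".toList ∨ hand = "forehand".toList
        · rw [if_pos hbf]
          -- whichever side the hand picks, a recognised shot would make base a key
          have contra : ∀ (s kb kf : String), shot = s.toList → kb ∈ keys → kf ∈ keys →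
              "backhand".toList ++ '_' :: s.toList = kb.toList →
              "forehand".toList ++ '_' :: s.toList = kf.toList → False := by
            intro s kb kf hs hkb hkf ekb ekf
            rcases hbf with h | h
            · exact hkey kb hkb (by rw [hdec, h, hs, ekb])
            · exact hkey kf hkf (by rw [hdec, h, hs, ekf])
          by_cases h1 : shot ∈ frontShots
          · exfalso
            simp [frontShots] at h1
            rcases h1 with h | h | h | h | h | h <;>
              [ exact contra "dribble" "backhand_dribble" "forehand_dribble" h (by decide) (by decide) (by decide) (by decide);
                exact contra "lift" "backhand_lift" "forehand_lift" h (by decide) (by decide) (by decide) (by decide);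
                exact contra "netkeep" "backhand_netkeep" "forehand_netkeep" h (by decide) (by decide) (by decide) (by decide);
                exact contra "nettap" "backhand_nettap" "forehand_nettap" h (by decide) (by decide) (by decide) (by decide);
                exact contra "push" "backhand_push" "forehand_push" h (by decide) (by decide) (by decide) (by decide);
                exact contra "netkill" "backhand_netkill" "forehand_netkill" h (by decide) (by decide) (by decide) (by decide) ]
          · rw [if_neg h1]
            by_cases h2 : shot ∈ backShots
            · exfalso
              simp [backShots] at h2
              rcases h2 with h | h | h | h | h | h <;>
                [ exact contra "smash" "backhand_smash" "forehand_smash" h (by decide) (by decide) (by decide) (by decide);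
                  exact contra "halfsmash" "backhand_halfsmash" "forehand_halfsmash" h (by decide) (by decide) (by decide) (by decide);
                  exact contra "clear" "backhand_clear" "forehand_clear" h (by decide) (by decide) (by decide) (by decide);
                  exact contra "drop" "backhand_drop" "forehand_drop" h (by decide) (by decide) (by decide) (by decide);
                  exact contra "pulldrop" "backhand_pulldrop" "forehand_pulldrop" h (by decide) (by decide) (by decide) (by decide);
                  exact contra "drive" "backhand_drive" "forehand_drive" h (by decide) (by decide) (by decide) (by decide) ]
            · rw [if_neg h2]
              by_cases h3 : shot = "defense".toList
              · exact absurd (contra "defense" "backhand_defense" "forehand_defense" h3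
                  (by decide) (by decide) (by decide) (by decide)) not_false
              · rw [if_neg h3]
        · rw [if_neg hbf]

set_option maxRecDepth 16000 in
lemma keys_agree : ∀ k ∈ keys, ruleZone k = aZoneLoop k pyZones := by decide

lemma zone_eq (base : String) : aZoneLoop base pyZones = ruleZone base := by
  by_cases hb : base ∈ keys
  · exact (keys_agree base hb).symm
  · rw [aZoneLoop_other base hb, ruleZone_other base hb]

-- ===== VERDICT (by name: the statement is the Claim_ definition above) =====
theorem categorize_shot_variation_py_spec : Claim_equal_categorize_shot_variation_py := by
  intro stroke _
  unfold Spec_categorize_shot_variation_py categorize_shot_variation_py categorize_shot_variation_py_alt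
  simp only [zone_eq]
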